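-- pv_equiv track=rewrite | github.com/maeri18/first-years-codes | informatique/dst 2021 info l1.py | invc_avant_dernier_un2
-- ===== SOURCE A (Python) =====
-- def inverse_char(c:str)->str:
--     """precondition: c=='0' or c=='1'
-- renvoie le caractere inverse de c"""
--     if c=='0':
--         return '1'
--     else:
--         return'0'
--
-- def invc_avant_dernier_un2(s:str)->str:
--     """precondition : s ne contient que des '1' et des '0'
-- """
--     i:int=-1
--     found:bool=False
--     tochange:bool=False
--     res:str=''
--     while i>-len(s)-1:
--         if s[i]=='1' and found==False:
--             res = s[i]+res
--             tochange=True
--             found=True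
--
--         elif tochange==True:
--             res=inverse_char(s[i]) + res
--             tochange=False
--
--         elif (found==True and tochange==False) or( tochange==False and found==False) :
--             res=s[i]+res
--
--         i=i-1
--     return res
-- ===== SOURCE B (Python) =====
-- def inverse_char(c: str) -> str:
--     if c == '0':
--         return '1'
--     else:
--         return '0'
--
-- def invc_avant_dernier_un2(s: str) -> str:
--     i = s.rfind('1')
--     if i <= 0:
--         return s
--     return s[:i-1] + inverse_char(s[i-1]) + s[i:]
-- ===== Notes on version B (the rewrite author's own statement) =====
-- stated objective: faster
-- what changed: Replaces the right-to-left state-machine scan (found/tochange flags, character-by-character prepend concatenation) with a single rfind of the last '1' plus a three-part slice splice inverting the character just left of it.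
import Mathlib
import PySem

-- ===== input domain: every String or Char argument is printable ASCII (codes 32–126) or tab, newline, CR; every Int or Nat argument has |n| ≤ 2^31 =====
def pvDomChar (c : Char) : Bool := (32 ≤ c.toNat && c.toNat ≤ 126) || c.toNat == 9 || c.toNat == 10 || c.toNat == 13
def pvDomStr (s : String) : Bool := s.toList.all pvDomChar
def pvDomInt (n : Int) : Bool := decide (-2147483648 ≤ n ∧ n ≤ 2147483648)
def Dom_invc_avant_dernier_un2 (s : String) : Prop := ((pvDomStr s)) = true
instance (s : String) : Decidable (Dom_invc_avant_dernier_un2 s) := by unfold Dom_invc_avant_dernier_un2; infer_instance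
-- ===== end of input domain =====

-- B replaces A's right-to-left flag-driven scan with one rfind plus slice splicing; objective: simpler.


-- ===== PORT A =====
def inverseChar (c : Char) : Char :=
  if c = '0' then '1' else '0'

-- A's while loop visits s[-1], s[-2], …, s[-len]: exactly the reversed character
-- list in order; ported as structural recursion over that reversed list with the
-- same (found, tochange, res) state, res prepended as in A.
def invcLoop : List Char → Bool → Bool → List Char → List Char
  | [], _, _, res => res
  | c :: cs, found, tochange, res =>
    if c = '1' ∧ found = false then invcLoop cs true true (c :: res)
    else if tochange = true then invcLoop cs found false (inverseChar c :: res)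
    else invcLoop cs found tochange (c :: res)

def invc_avant_dernier_un2 (s : String) : String :=
  String.ofList (invcLoop s.toList.reverse false false [])

-- ===== PORT B =====
-- str.rfind('1') : last index of '1', or -1 (hand port, left-to-right scan keeping the last hit)
def rfind1 : List Char → Nat → Int → Int
  | [], _, acc => acc
  | c :: cs, n, acc => rfind1 cs (n + 1) (if c = '1' then (n : Int) else acc)

def invc_avant_dernier_un2_alt (s : String) : String :=
  let l := s.toList
  let i := rfind1 l 0 (-1)
  if i ≤ 0 then s
  else
    String.ofList (PySem.List.slice l (some 0) (some (i - 1)) ++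
               [inverseChar (PySem.List.pyGetD l (i - 1) ' ')] ++
               PySem.List.slice l (some i) none)

-- ===== PRECONDITION & SPEC =====
def Spec_invc_avant_dernier_un2 (s : String) (out : String) : Prop := out = invc_avant_dernier_un2_alt s
instance (s : String) (out : String) : Decidable (Spec_invc_avant_dernier_un2 s out) := by unfold Spec_invc_avant_dernier_un2; infer_instance

-- ===== CLAIM (what is proved, stated in full; the proofs are below) =====
def Claim_equal_invc_avant_dernier_un2 : Prop := ∀ (s : String), Dom_invc_avant_dernier_un2 s → Spec_invc_avant_dernier_un2 s (invc_avant_dernier_un2 s)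

-- ===== LEMMAS AND PROOFS =====

-- pass-through once the '1' has been handled
theorem invcLoop_pass (r : List Char) : ∀ res, invcLoop r true false res = r.reverse ++ res := by
  induction r with
  | nil => intro res; simp [invcLoop]
  | cons c cs ih => intro res; simp [invcLoop, ih]

-- pass-through before any '1' has been seen
theorem invcLoop_no_one (r : List Char) (h : '1' ∉ r) :
    ∀ res, invcLoop r false false res = r.reverse ++ res := by
  induction r with
  | nil => intro res; simp [invcLoop]
  | cons c cs ih =>
    intro res
    simp only [List.mem_cons, not_or] at h
    simp [invcLoop, Ne.symm h.1, ih h.2]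

theorem invcLoop_no_one_split (x : List Char) (h : '1' ∉ x) :
    ∀ (y res : List Char), invcLoop (x ++ y) false false res = invcLoop y false false (x.reverse ++ res) := by
  induction x with
  | nil => intro y res; simp
  | cons c cs ih =>
    intro y res
    simp only [List.mem_cons, not_or] at h
    simp [invcLoop, Ne.symm h.1, ih h.2, List.append_assoc]

theorem rfind1_no_one (y : List Char) (h : '1' ∉ y) :
    ∀ n acc, rfind1 y n acc = acc := by
  induction y with
  | nil => intro n acc; rfl
  | cons c cs ih =>
    intro n acc
    simp only [List.mem_cons, not_or] at h
    simp [rfind1, Ne.symm h.1, ih h.2]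

theorem rfind1_append (x : List Char) :
    ∀ (z : List Char) (n : Nat) (acc : Int),
      rfind1 (x ++ z) n acc = rfind1 z (n + x.length) (rfind1 x n acc) := by
  induction x with
  | nil => intro z n acc; simp [rfind1]
  | cons c cs ih =>
    intro z n acc
    simp only [List.cons_append, rfind1, ih, List.length_cons]
    ring_nf

-- at the decomposition l = a ++ '1' :: b with no '1' in b, rfind1 returns a.length
theorem rfind1_last (a b : List Char) (hb : '1' ∉ b) :
    rfind1 (a ++ '1' :: b) 0 (-1) = (a.length : Int) := by
  rw [rfind1_append]
  simp [rfind1, rfind1_no_one b hb]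

-- first-occurrence decomposition
theorem split_first_one (r : List Char) (h : '1' ∈ r) :
    ∃ p q, r = p ++ '1' :: q ∧ '1' ∉ p := by
  induction r with
  | nil => cases h
  | cons c cs ih =>
    by_cases hc : c = '1'
    · exact ⟨[], cs, by simp [hc], by simp⟩
    · have h2 : '1' ∈ cs := by
        rcases List.mem_cons.mp h with h1 | h2
        · exact absurd h1.symm hc
        · exact h2
      rcases ih h2 with ⟨p, q, hpq, hp⟩
      exact ⟨c :: p, q, by simp [hpq], by simp [hp, Ne.symm hc]⟩

-- consume the '1' (first of the reversed list) and the char left of it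
theorem invcLoop_true_true (q : List Char) (res : List Char) :
    invcLoop q true true res =
      (match q with
       | [] => res
       | d :: ds => ds.reverse ++ inverseChar d :: res) := by
  cases q with
  | nil => rfl
  | cons d ds => simp [invcLoop, invcLoop_pass]

theorem main_lists (l : List Char) :
    invcLoop l.reverse false false [] =
      (if rfind1 l 0 (-1) ≤ 0 then l
       else PySem.List.slice l (some 0) (some (rfind1 l 0 (-1) - 1)) ++
            [inverseChar (PySem.List.pyGetD l (rfind1 l 0 (-1) - 1) ' ')] ++
            PySem.List.slice l (some (rfind1 l 0 (-1))) none) := by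
  by_cases h : '1' ∈ l
  · -- decompose l.reverse at its FIRST '1' = the LAST '1' of l
    rcases split_first_one l.reverse (by simpa using h) with ⟨p, q, hpq, hp⟩
    have hl : l = q.reverse ++ '1' :: p.reverse := by
      have := congrArg List.reverse hpq
      simpa using this
    have hfind : rfind1 l 0 (-1) = (q.length : Int) := by
      rw [hl]
      have := rfind1_last q.reverse p.reverse (by simpa using hp)
      simpa using this
    have hA : invcLoop l.reverse false false [] = invcLoop q true true ('1' :: p.reverse) := by
      rw [hpq, invcLoop_no_one_split p hp]
      simp [invcLoop]
    cases q with
    | nil =>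
      rw [hA, invcLoop_true_true, hfind]
      simp [hl]
    | cons d ds =>
      rw [hA, invcLoop_true_true, hfind]
      have hlen : ¬ ((((d :: ds).length : Nat) : Int) ≤ 0) := by
        simp
      rw [if_neg hlen]
      have h1 : (((d :: ds).length : Nat) : Int) - 1 = ((ds.length : Nat) : Int) := by
        push_cast [List.length_cons]
        ring
      rw [h1]
      have hslice1 : PySem.List.slice l (some 0) (some ((ds.length : Nat) : Int)) = ds.reverse := by
        rw [PySem.List.slice_zero_start, PySem.List.slice_to_natCast, hl]
        simp
      have hget : PySem.List.pyGetD l ((ds.length : Nat) : Int) ' ' = d := by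
        rw [PySem.List.pyGetD_natCast, hl]
        simp
      have hslice2 : PySem.List.slice l (some (((d :: ds).length : Nat) : Int)) none = '1' :: p.reverse := by
        rw [PySem.List.slice_from_natCast, hl]
        have : (d :: ds).length = ((d :: ds).reverse).length := by simp
        rw [this, List.drop_left]
      rw [hslice1, hget, hslice2]
      simp
  · have hr : '1' ∉ l.reverse := by simpa using h
    rw [invcLoop_no_one l.reverse hr]
    have : rfind1 l 0 (-1) = -1 := rfind1_no_one l h 0 (-1)
    simp [this]

-- ===== VERDICT (by name: the statement is the Claim_ definition above) =====
theorem invc_avant_dernier_un2_spec : Claim_equal_invc_avant_dernier_un2 := by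
  intro s _
  unfold Spec_invc_avant_dernier_un2 invc_avant_dernier_un2 invc_avant_dernier_un2_alt
  simp only [main_lists s.toList]
  split
  · simp
  · rfl
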